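-- pv_equiv track=rewrite | github.com/rosenrose/cos_pro | python/2차 1급 6_initial_code.py | solution
-- ===== SOURCE A (Python) =====
-- def solution(commands):
--     x, y = [0, 0]
--
--     for command in commands:
--         match command:
--             case "L":
--                 x -= 1
--             case "R":
--                 x += 1
--             case "U":
--                 y += 1
--             case "D":
--                 y -= 1
--
--     answer = [x, y]
--
--     return answer
-- ===== SOURCE B (Python) =====
-- def solution(commands):
--     # Divide and conquer: displacement of a concatenation is the sum of the
--     # displacements of the halves; base cases are the empty and singleton lists.
--     def disp(cmds):
--         if not cmds:
--             return (0, 0)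
--         if len(cmds) == 1:
--             c = cmds[0]
--             return ((c == "R") - (c == "L"), (c == "U") - (c == "D"))
--         mid = len(cmds) // 2
--         x1, y1 = disp(cmds[:mid])
--         x2, y2 = disp(cmds[mid:])
--         return (x1 + x2, y1 + y2)
--
--     x, y = disp(commands)
--     return [x, y]
-- ===== Notes on version B (the rewrite author's own statement) =====
-- stated objective: alternative
-- what changed: Replaces A's left-to-right accumulator loop with a divide-and-conquer recursion: split the command list in half, compute each half's displacement recursively, and add the two vectors (per-singleton value given by boolean arithmetic, no branching).
import Mathlib
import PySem

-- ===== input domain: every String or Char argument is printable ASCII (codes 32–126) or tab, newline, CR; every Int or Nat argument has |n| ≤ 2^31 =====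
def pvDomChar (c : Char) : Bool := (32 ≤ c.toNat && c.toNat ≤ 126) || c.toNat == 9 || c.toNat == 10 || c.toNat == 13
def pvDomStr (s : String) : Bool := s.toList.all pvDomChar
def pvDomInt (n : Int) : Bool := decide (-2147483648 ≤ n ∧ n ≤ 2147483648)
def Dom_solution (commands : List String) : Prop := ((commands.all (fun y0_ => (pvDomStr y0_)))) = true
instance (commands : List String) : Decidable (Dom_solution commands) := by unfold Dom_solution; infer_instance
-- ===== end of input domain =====

-- B computes the displacement by divide and conquer (split, recurse, add vectors)
-- instead of A's left-to-right accumulator loop; an alternative of the same cost.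

-- ===== PORT A =====
def solution (commands : List String) : List Int :=
  let p := commands.foldl (fun (st : Int × Int) command =>
    let (x, y) := st
    if command = "L" then (x - 1, y)
    else if command = "R" then (x + 1, y)
    else if command = "U" then (x, y + 1)
    else if command = "D" then (x, y - 1)
    else (x, y)) (0, 0)
  [p.1, p.2]

-- ===== PORT B =====
def dispB : List String → Int × Int
  | [] => (0, 0)
  | [c] => ((if c = "R" then 1 else 0) - (if c = "L" then 1 else 0),
            (if c = "U" then 1 else 0) - (if c = "D" then 1 else 0))
  | c1 :: c2 :: rest =>
    let mid := (c1 :: c2 :: rest).length / 2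
    let a := dispB ((c1 :: c2 :: rest).take mid)
    let b := dispB ((c1 :: c2 :: rest).drop mid)
    (a.1 + b.1, a.2 + b.2)
termination_by cmds => cmds.length
decreasing_by
  all_goals simp only [List.length_take, List.length_drop, List.length_cons]; omega

def solution_alt (commands : List String) : List Int :=
  let p := dispB commands
  [p.1, p.2]

-- ===== PRECONDITION & SPEC =====
def Spec_solution (commands : List String) (out : List Int) : Prop := out = solution_alt commands
instance (commands : List String) (out : List Int) : Decidable (Spec_solution commands out) := by unfold Spec_solution; infer_instance

-- ===== CLAIM (what is proved, stated in full; the proofs are below) =====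
def Claim_equal_solution : Prop := ∀ (commands : List String), Dom_solution commands → Spec_solution commands (solution commands)

-- ===== LEMMAS AND PROOFS =====
theorem solution_fold (commands : List String) (x y : Int) :
    commands.foldl (fun (st : Int × Int) command =>
      let (x, y) := st
      if command = "L" then (x - 1, y)
      else if command = "R" then (x + 1, y)
      else if command = "U" then (x, y + 1)
      else if command = "D" then (x, y - 1)
      else (x, y)) (x, y)
    = (x + commands.count "R" - commands.count "L",
       y + commands.count "U" - commands.count "D") := by
  induction commands generalizing x y with
  | nil => simp
  | cons c cs ih =>
    simp only [List.foldl_cons, List.count_cons]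
    rw [ih]
    simp only [beq_iff_eq]
    by_cases h1 : c = "L" <;> by_cases h2 : c = "R" <;> by_cases h3 : c = "U" <;> by_cases h4 : c = "D" <;>
      simp_all <;> omega

theorem dispB_count (commands : List String) :
    dispB commands
    = ((commands.count "R" : Int) - commands.count "L",
       (commands.count "U" : Int) - commands.count "D") := by
  induction commands using dispB.induct with
  | case1 => simp [dispB]
  | case2 c =>
    simp only [dispB, List.count_cons, List.count_nil, beq_iff_eq]
    by_cases h1 : c = "L" <;> by_cases h2 : c = "R" <;> by_cases h3 : c = "U" <;> by_cases h4 : c = "D" <;>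
      simp_all
  | case3 c1 c2 rest mid ih1 ih2 =>
    have hcnt : ∀ s : String, ((c1 :: c2 :: rest).take ((c1 :: c2 :: rest).length / 2)).count s
        + ((c1 :: c2 :: rest).drop ((c1 :: c2 :: rest).length / 2)).count s = (c1 :: c2 :: rest).count s := by
      intro s; rw [← List.count_append, List.take_append_drop]
    simp only [show mid = (c1 :: c2 :: rest).length / 2 from rfl] at ih1 ih2
    rw [dispB]
    simp only [ih1, ih2, Prod.mk.injEq]
    have hR := hcnt "R"; have hL := hcnt "L"; have hU := hcnt "U"; have hD := hcnt "D"
    refine ⟨?_, ?_⟩ <;> omega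

-- ===== VERDICT (by name: the statement is the Claim_ definition above) =====
theorem solution_spec : Claim_equal_solution := by
  intro commands _
  unfold Spec_solution solution solution_alt
  rw [solution_fold, dispB_count]
  norm_num
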